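-- pv_equiv track=rewrite | github.com/Siddharth1047/code-till-job | Day-18(2D).py | rooks_are_safe
-- ===== SOURCE A (Python) =====
-- def rooks_are_safe(chess):
--   n = len(chess)
--   for row_i in range(n):
--     row_count = 0
--     for col_i in range(n):
--       row_count += chess[row_i][col_i]
--     if row_count > 1:
--       return False
--   for col_i in range(n):
--     col_count = 0
--     for row_i in range(n):
--       col_count += chess[row_i][col_i]
--     if col_count > 1:
--       return False
--   return True
-- ===== SOURCE B (Python) =====
-- def rooks_are_safe(chess):
--     n = len(chess)
--     row_counts = [0] * n
--     col_counts = [0] * n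
--     for i in range(n):
--         for j in range(n):
--             v = chess[i][j]
--             row_counts[i] += v
--             col_counts[j] += v
--     for c in row_counts + col_counts:
--         if c > 1:
--             return False
--     return True
-- ===== Notes on version B (the rewrite author's own statement) =====
-- stated objective: alternative
-- what changed: Replaces A's two staged per-line scans (row sums with early return, then column sums with early return, each re-walking the board) by a single interleaved pass over all cells that accumulates row_counts[i] and col_counts[j] together, followed by one separate checking scan over the concatenated count lists.
-- outside the precondition, e.g. on rooks_are_safe([[2, 0], [0]]): A returns False, B raises IndexError
import Mathlib
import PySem

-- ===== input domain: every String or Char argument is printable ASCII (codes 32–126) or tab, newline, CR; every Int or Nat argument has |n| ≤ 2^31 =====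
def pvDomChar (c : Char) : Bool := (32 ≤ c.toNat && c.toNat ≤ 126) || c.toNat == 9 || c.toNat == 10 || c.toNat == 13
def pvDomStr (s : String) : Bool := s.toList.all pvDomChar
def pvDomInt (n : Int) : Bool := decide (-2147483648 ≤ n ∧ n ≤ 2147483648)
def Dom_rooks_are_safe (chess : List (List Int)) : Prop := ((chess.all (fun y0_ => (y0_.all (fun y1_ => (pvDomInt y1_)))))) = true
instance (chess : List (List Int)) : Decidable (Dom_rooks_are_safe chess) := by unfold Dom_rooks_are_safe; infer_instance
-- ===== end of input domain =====

-- B replaces A's two staged per-line scans (row sums, then column sums, each with an early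
-- return) by one interleaved pass over all cells accumulating row_counts and col_counts
-- together, followed by a separate checking phase (alternative decomposition; same cost).


-- ===== PORT A =====
-- A's inner row loop: row_count accumulated over col_i in range(n)
def rowSumA (n : Int) (row : List Int) : Int :=
  (PySem.List.pyRange 0 n).foldl (fun acc j => acc + PySem.List.pyGetD row j 0) 0

-- A's inner column loop: col_count accumulated over row_i in range(n)
def colSumA (chess : List (List Int)) (n : Int) (j : Int) : Int :=
  (PySem.List.pyRange 0 n).foldl (fun acc i => acc + PySem.List.pyGetD (PySem.List.pyGetD chess i []) j 0) 0

def rooks_are_safe (chess : List (List Int)) : Bool :=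
  let n : Int := chess.length
  if (PySem.List.pyRange 0 n).any (fun i => decide (rowSumA n (PySem.List.pyGetD chess i []) > 1)) then false
  else if (PySem.List.pyRange 0 n).any (fun j => decide (colSumA chess n j > 1)) then false
  else true

-- ===== PORT B =====
-- one pass over all cells, updating row_counts[i] and col_counts[j] together;
-- then a single checking scan over row_counts + col_counts
def rooks_are_safe_alt (chess : List (List Int)) : Bool :=
  let n : Int := chess.length
  let counts :=
    (PySem.List.pyRange 0 n).foldl
      (fun st i =>
        (PySem.List.pyRange 0 n).foldl
          (fun st j =>
            let v := PySem.List.pyGetD (PySem.List.pyGetD chess i []) j 0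
            (st.1.set i.toNat (st.1.getD i.toNat 0 + v),
             st.2.set j.toNat (st.2.getD j.toNat 0 + v))) st)
      (List.replicate chess.length 0, List.replicate chess.length 0)
  (counts.1 ++ counts.2).all (fun c => !decide (c > 1))

-- ===== PRECONDITION & SPEC =====
-- Pre_ excludes ragged boards (some row shorter than the number of rows): there A's
-- chess[row_i][col_i] raises IndexError, except when an earlier over-full row already
-- triggered the early `return False` — and on those inputs B itself raises IndexError
-- during its accumulation pass.
def Pre_rooks_are_safe (chess : List (List Int)) : Prop :=
  ∀ row ∈ chess, chess.length ≤ row.length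
instance (chess : List (List Int)) : Decidable (Pre_rooks_are_safe chess) := by
  unfold Pre_rooks_are_safe; infer_instance

def pvWitness_rooks_are_safe : List (List Int) := [[1, 0], [0, 1]]

def Spec_rooks_are_safe (chess : List (List Int)) (out : Bool) : Prop := out = rooks_are_safe_alt chess
instance (chess : List (List Int)) (out : Bool) : Decidable (Spec_rooks_are_safe chess out) := by unfold Spec_rooks_are_safe; infer_instance

-- ===== CLAIM (what is proved, stated in full; the proofs are below) =====
def Claim_equal_rooks_are_safe : Prop := ∀ (chess : List (List Int)), Dom_rooks_are_safe chess → Pre_rooks_are_safe chess → Spec_rooks_are_safe chess (rooks_are_safe chess)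

-- ===== LEMMAS AND PROOFS =====

-- value of cell (i, j) as both ports read it
def cellV (chess : List (List Int)) (i j : Nat) : Int :=
  PySem.List.pyGetD (PySem.List.pyGetD chess (i : Int) []) ((j : Int)) 0

def rowS (chess : List (List Int)) (i : Nat) : Int :=
  ((List.range chess.length).map (cellV chess i)).sum

def colS (chess : List (List Int)) (j : Nat) : Int :=
  ((List.range chess.length).map (fun i => cellV chess i j)).sum

theorem getD_set_self (l : List Int) (a : Nat) (x : Int) (h : a < l.length) :
    (l.set a x).getD a 0 = x := by
  rw [List.getD_eq_getElem _ _ (by simpa using h)]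
  exact List.getElem_set_self (by simpa using h)

theorem getD_set_ne (l : List Int) (a t : Nat) (x : Int) (h : t ≠ a) :
    (l.set a x).getD t 0 = l.getD t 0 := by
  simp [List.getD_eq_getElem?_getD, List.getElem?_set_ne (Ne.symm h)]

-- row accumulation at a fixed index
theorem foldl_set_accum (a : Nat) :
    ∀ (l : List Int) (rc : List Int), a < rc.length →
      l.foldl (fun rc x => rc.set a (rc.getD a 0 + x)) rc = rc.set a (rc.getD a 0 + l.sum)
  | [], rc, h => by
    simp only [List.foldl_nil, List.sum_nil, add_zero]
    rw [List.getD_eq_getElem _ _ h, List.set_getElem_self]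
  | x :: xs, rc, h => by
    simp only [List.foldl_cons]
    rw [foldl_set_accum a xs _ (by simpa using h), getD_set_self _ _ _ h, List.set_set,
      List.sum_cons, add_assoc]

-- one column-accumulation pass: pointwise effect
theorem col_pass (w : Nat → Int) (k : Nat) : ∀ (cc : List Int),
    (((List.range k).foldl (fun cc j => cc.set j (cc.getD j 0 + w j)) cc).length = cc.length)
    ∧ ∀ t, ((List.range k).foldl (fun cc j => cc.set j (cc.getD j 0 + w j)) cc).getD t 0
        = cc.getD t 0 + (if t < k ∧ t < cc.length then w t else 0) := by
  induction k with
  | zero => intro cc; simp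
  | succ k ih =>
    intro cc
    obtain ⟨ihl, ihg⟩ := ih cc
    rw [List.range_succ, List.foldl_append, List.foldl_cons, List.foldl_nil]
    constructor
    · rw [List.length_set, ihl]
    · intro t
      by_cases ht : t = k
      · subst ht
        by_cases hlt : t < cc.length
        · rw [getD_set_self _ _ _ (by rw [ihl]; exact hlt), ihg t]
          simp [hlt]
        · rw [List.set_eq_of_length_le (by rw [ihl]; omega), ihg t]
          simp [hlt]
      · rw [getD_set_ne _ _ _ _ ht, ihg t]
        have : (t < k ∧ t < cc.length) ↔ (t < k + 1 ∧ t < cc.length) := by omega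
        simp only [this]

-- splitting the pair-state cell loop into its two independent accumulators
theorem inner_split (chess : List (List Int)) (m i : Nat) (st : List Int × List Int) :
    (List.range m).foldl
        (fun st j => (st.1.set i (st.1.getD i 0 + cellV chess i j),
                      st.2.set j (st.2.getD j 0 + cellV chess i j))) st
      = ((List.range m).foldl (fun rc j => rc.set i (rc.getD i 0 + cellV chess i j)) st.1,
         (List.range m).foldl (fun cc j => cc.set j (cc.getD j 0 + cellV chess i j)) st.2) := by
  obtain ⟨a, b⟩ := st
  exact PySem.List.foldl_prod_mk (fun rc j => rc.set i (rc.getD i 0 + cellV chess i j))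
    (fun cc j => cc.set j (cc.getD j 0 + cellV chess i j)) (List.range m) a b

-- the row_counts accumulator after k outer steps
theorem rc_loop (chess : List (List Int)) : ∀ k, k ≤ chess.length →
    (((List.range k).foldl
        (fun rc i => (List.range chess.length).foldl
          (fun rc j => rc.set i (rc.getD i 0 + cellV chess i j)) rc)
        (List.replicate chess.length 0)).length = chess.length)
    ∧ ∀ t, ((List.range k).foldl
        (fun rc i => (List.range chess.length).foldl
          (fun rc j => rc.set i (rc.getD i 0 + cellV chess i j)) rc)
        (List.replicate chess.length 0)).getD t 0 = if t < k then rowS chess t else 0 := by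
  intro k
  induction k with
  | zero =>
    intro _
    refine ⟨by simp, fun t => ?_⟩
    simp [List.getD_eq_getElem?_getD, List.getElem?_replicate]
    split <;> simp
  | succ k ih =>
    intro hk
    obtain ⟨ihl, ihg⟩ := ih (by omega)
    rw [List.range_succ, List.foldl_append, List.foldl_cons, List.foldl_nil]
    have hstep : ∀ rc : List Int, k < rc.length →
        (List.range chess.length).foldl (fun rc j => rc.set k (rc.getD k 0 + cellV chess k j)) rc
          = rc.set k (rc.getD k 0 + rowS chess k) := by
      intro rc hrc
      have h2 := foldl_set_accum k ((List.range chess.length).map (cellV chess k)) rc hrc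
      rw [List.foldl_map] at h2
      exact h2
    rw [hstep _ (by rw [ihl]; omega)]
    refine ⟨by rw [List.length_set, ihl], fun t => ?_⟩
    by_cases ht : t = k
    · subst ht
      rw [getD_set_self _ _ _ (by rw [ihl]; omega), ihg t]
      simp
    · rw [getD_set_ne _ _ _ _ ht, ihg t]
      have : (t < k) ↔ (t < k + 1) := by omega
      simp only [this]

-- the col_counts accumulator after k outer steps
theorem cc_loop (chess : List (List Int)) : ∀ k : Nat,
    (((List.range k).foldl
        (fun cc i => (List.range chess.length).foldl
          (fun cc j => cc.set j (cc.getD j 0 + cellV chess i j)) cc)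
        (List.replicate chess.length 0)).length = chess.length)
    ∧ ∀ t, ((List.range k).foldl
        (fun cc i => (List.range chess.length).foldl
          (fun cc j => cc.set j (cc.getD j 0 + cellV chess i j)) cc)
        (List.replicate chess.length 0)).getD t 0
      = if t < chess.length then ((List.range k).map (fun i => cellV chess i t)).sum else 0 := by
  intro k
  induction k with
  | zero =>
    refine ⟨by simp, fun t => ?_⟩
    simp [List.getD_eq_getElem?_getD, List.getElem?_replicate]
    split <;> simp
  | succ k ih =>
    obtain ⟨ihl, ihg⟩ := ih
    rw [List.range_succ, List.foldl_append, List.foldl_cons, List.foldl_nil]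
    obtain ⟨pl, pg⟩ := col_pass (fun j => cellV chess k j) chess.length _
    constructor
    · rw [pl, ihl]
    · intro t
      rw [pg t, ihg t, ihl]
      by_cases hlt : t < chess.length
      · simp only [hlt, and_true, if_true, List.map_append, List.sum_append,
          List.map_cons, List.map_nil, List.sum_cons, List.sum_nil, add_zero]
      · simp [hlt]
  -- (the pass leaves entries at or beyond chess.length untouched)

theorem eq_map_of_getD (l : List Int) (n : Nat) (f : Nat → Int)
    (hl : l.length = n) (h : ∀ t, l.getD t 0 = if t < n then f t else 0) :
    l = (List.range n).map f := by
  apply List.ext_getElem (by simpa using hl)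
  intro i h1 h2
  have hi : i < n := by omega
  have := h i
  rw [List.getD_eq_getElem _ _ h1, if_pos hi] at this
  simpa using this

theorem ite_form (a b : Bool) : (if a then false else if b then false else true) = (!a && !b) := by
  cases a <;> cases b <;> rfl

theorem rowSumA_eq (chess : List (List Int)) (k : Nat) :
    rowSumA (chess.length : Int) (PySem.List.pyGetD chess (k : Int) []) = rowS chess k := by
  unfold rowSumA rowS
  rw [PySem.List.pyRange_zero_nat, List.foldl_map,
    PySem.List.foldl_add (List.range chess.length)
      (fun j : Nat => PySem.List.pyGetD (PySem.List.pyGetD chess (k : Int) []) ((j : Int)) 0) 0]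
  rw [zero_add]
  refine congrArg List.sum (List.map_congr_left fun j _ => ?_)
  simp [cellV, PySem.List.pyGetD_natCast]

theorem colSumA_eq (chess : List (List Int)) (t : Nat) :
    colSumA chess (chess.length : Int) (t : Int) = colS chess t := by
  unfold colSumA colS
  rw [PySem.List.pyRange_zero_nat, List.foldl_map,
    PySem.List.foldl_add (List.range chess.length)
      (fun i : Nat => PySem.List.pyGetD (PySem.List.pyGetD chess (i : Int) []) ((t : Int)) 0) 0]
  rw [zero_add]
  refine congrArg List.sum (List.map_congr_left fun j _ => ?_)
  simp [cellV, PySem.List.pyGetD_natCast]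

theorem all_not_eq_not_any (l : List Nat) (p : Nat → Bool) :
    l.all (fun t => !p t) = !(l.any p) := by
  rw [List.all_eq_not_any_not]
  simp

-- ===== VERDICT (by name: the statement is the Claim_ definition above) =====
theorem rooks_are_safe_spec : Claim_equal_rooks_are_safe := by
  intro chess _dom _pre
  unfold Spec_rooks_are_safe
  show rooks_are_safe chess = rooks_are_safe_alt chess
  unfold rooks_are_safe rooks_are_safe_alt
  simp only []
  rw [ite_form]
  -- normalise B's double fold to Nat-indexed folds over List.range
  have hcounts :
      (PySem.List.pyRange 0 (chess.length : Int)).foldl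
        (fun st i =>
          (PySem.List.pyRange 0 (chess.length : Int)).foldl
            (fun st j =>
              let v := PySem.List.pyGetD (PySem.List.pyGetD chess i []) j 0
              (st.1.set i.toNat (st.1.getD i.toNat 0 + v),
               st.2.set j.toNat (st.2.getD j.toNat 0 + v))) st)
        (List.replicate chess.length 0, List.replicate chess.length 0)
      = ((List.range chess.length).foldl
           (fun rc i => (List.range chess.length).foldl
             (fun rc j => rc.set i (rc.getD i 0 + cellV chess i j)) rc)
           (List.replicate chess.length 0),
         (List.range chess.length).foldl
           (fun cc i => (List.range chess.length).foldl
             (fun cc j => cc.set j (cc.getD j 0 + cellV chess i j)) cc)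
           (List.replicate chess.length 0)) := by
    rw [PySem.List.pyRange_zero_nat, List.foldl_map]
    have hbody : ∀ (st : List Int × List Int) (i : Nat),
        (List.map (fun k : Nat => (k : Int)) (List.range chess.length)).foldl
          (fun st j =>
            let v := PySem.List.pyGetD (PySem.List.pyGetD chess ((i : Nat) : Int) []) j 0
            (st.1.set ((i : Nat) : Int).toNat (st.1.getD ((i : Nat) : Int).toNat 0 + v),
             st.2.set j.toNat (st.2.getD j.toNat 0 + v))) st
        = ((List.range chess.length).foldl (fun rc j => rc.set i (rc.getD i 0 + cellV chess i j)) st.1,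
           (List.range chess.length).foldl (fun cc j => cc.set j (cc.getD j 0 + cellV chess i j)) st.2) := by
      intro st i
      rw [List.foldl_map]
      have : (fun (st : List Int × List Int) (j : Nat) =>
            let v := PySem.List.pyGetD (PySem.List.pyGetD chess ((i : Nat) : Int) []) ((j : Nat) : Int) 0
            (st.1.set ((i : Nat) : Int).toNat (st.1.getD ((i : Nat) : Int).toNat 0 + v),
             st.2.set ((j : Nat) : Int).toNat (st.2.getD ((j : Nat) : Int).toNat 0 + v)))
          = (fun (st : List Int × List Int) (j : Nat) =>
            (st.1.set i (st.1.getD i 0 + cellV chess i j),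
             st.2.set j (st.2.getD j 0 + cellV chess i j))) := by
        funext st j
        simp [cellV, Int.toNat_natCast]
      rw [this]
      exact inner_split chess chess.length i st
    have houter : (fun (st : List Int × List Int) (i : Nat) =>
          (List.map (fun k : Nat => (k : Int)) (List.range chess.length)).foldl
            (fun st j =>
              let v := PySem.List.pyGetD (PySem.List.pyGetD chess ((i : Nat) : Int) []) j 0
              (st.1.set ((i : Nat) : Int).toNat (st.1.getD ((i : Nat) : Int).toNat 0 + v),
               st.2.set j.toNat (st.2.getD j.toNat 0 + v))) st)
        = (fun (st : List Int × List Int) (i : Nat) =>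
          ((List.range chess.length).foldl (fun rc j => rc.set i (rc.getD i 0 + cellV chess i j)) st.1,
           (List.range chess.length).foldl (fun cc j => cc.set j (cc.getD j 0 + cellV chess i j)) st.2)) := by
      funext st i; exact hbody st i
    rw [houter]
    exact PySem.List.foldl_prod_mk
      (fun rc i => (List.range chess.length).foldl (fun rc j => rc.set i (rc.getD i 0 + cellV chess i j)) rc)
      (fun cc i => (List.range chess.length).foldl (fun cc j => cc.set j (cc.getD j 0 + cellV chess i j)) cc)
      (List.range chess.length) (List.replicate chess.length 0) (List.replicate chess.length 0)
  rw [hcounts]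
  -- identify the two count lists
  obtain ⟨rl, rg⟩ := rc_loop chess chess.length (le_refl _)
  obtain ⟨cl, cg⟩ := cc_loop chess chess.length
  rw [eq_map_of_getD _ chess.length (rowS chess) rl rg,
      eq_map_of_getD _ chess.length (colS chess) cl (by
        intro t; rw [cg t]; unfold colS; rfl)]
  -- both sides as range-indexed checks
  rw [List.all_append, List.all_map, List.all_map]
  rw [PySem.List.pyRange_zero_nat, List.any_map, List.any_map]
  have e1 : ∀ k ∈ List.range chess.length,
      ((fun i => decide (rowSumA (chess.length : Int) (PySem.List.pyGetD chess i []) > 1)) ∘ fun k : Nat => (k : Int)) k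
        = (fun t : Nat => decide (rowS chess t > 1)) k := by
    intro k _; simp only [Function.comp]; rw [rowSumA_eq]
  have e2 : ∀ k ∈ List.range chess.length,
      ((fun j => decide (colSumA chess (chess.length : Int) j > 1)) ∘ fun k : Nat => (k : Int)) k
        = (fun t : Nat => decide (colS chess t > 1)) k := by
    intro k _; simp only [Function.comp]; rw [colSumA_eq]
  rw [PySem.List.any_congr_mem e1, PySem.List.any_congr_mem e2]
  have b1 : List.all (List.range chess.length) ((fun c => !decide (c > 1)) ∘ rowS chess)
      = !(List.range chess.length).any (fun t => decide (rowS chess t > 1)) := by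
    rw [← all_not_eq_not_any]; rfl
  have b2 : List.all (List.range chess.length) ((fun c => !decide (c > 1)) ∘ colS chess)
      = !(List.range chess.length).any (fun t => decide (colS chess t > 1)) := by
    rw [← all_not_eq_not_any]; rfl
  rw [b1, b2]
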